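-- pv_equiv track=rewrite | github.com/KongXiangFantasy/University-code | CSC 110 (saved in C)/assignment4.py | get_abundance
-- ===== SOURCE A (Python) =====
-- import math
--
-- def get_abundance(num:int) -> int:
--     '''
--     Enter a number and this function will return the abundance of the number entered.
--
--     Preconditions: num >= 0
--     >>> get_abundance(12)
--     4
--     >>> get_abundance(0)
--     0
--     '''
--     result = 0
--     if(num < 12):
--         return 0
--     for num1 in range(2,(int)(math.sqrt(num))+1) :
--         if (num % num1 == 0) :
--             if (num1 == (num/num1)) :
--                 result += num1
--             else :
--                 result +=(num1 + num//num1)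
--     if (result + 1 <= num):
--         return 0
--     else:
--         return (result + 1 - num)
-- ===== SOURCE B (Python) =====
-- def get_abundance(num: int) -> int:
--     if num < 12:
--         return 0
--     sigma = 1          # multiplicative: product of sigma(p^k) over prime powers of num
--     n = num
--     p = 2
--     while p * p <= n:
--         if n % p == 0:
--             power_sum = 1
--             while n % p == 0:
--                 n //= p
--                 power_sum = power_sum * p + 1   # 1 + p + ... + p^k
--             sigma *= power_sum
--         p += 1
--     if n > 1:
--         sigma *= n + 1    # leftover prime factor
--     s = sigma - num       # sum of proper divisors
--     return s - num if s > num else 0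
-- ===== Notes on version B (the rewrite author's own statement) =====
-- stated objective: alternative
-- what changed: Replaced A's sqrt-bounded divisor-pairing scan (which adds each small divisor together with its cofactor, special-cases perfect squares, and re-adds the unit divisor) by trial-division prime factorization: the divisor sum is the product of the geometric sums sigma(p^k) over the prime-power factors, and the abundance is the positive part of that sum minus twice the input.
import Mathlib
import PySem

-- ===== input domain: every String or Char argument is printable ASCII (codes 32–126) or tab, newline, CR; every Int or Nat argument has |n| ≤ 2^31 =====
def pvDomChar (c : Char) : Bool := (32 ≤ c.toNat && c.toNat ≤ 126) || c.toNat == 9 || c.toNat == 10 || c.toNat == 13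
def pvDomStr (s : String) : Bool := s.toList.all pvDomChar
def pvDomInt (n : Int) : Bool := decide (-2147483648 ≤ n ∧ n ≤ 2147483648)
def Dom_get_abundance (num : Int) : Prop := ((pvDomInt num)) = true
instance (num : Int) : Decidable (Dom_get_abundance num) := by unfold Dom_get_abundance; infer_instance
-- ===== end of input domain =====

-- B replaces A's sqrt-bounded divisor-pairing scan by trial-division prime factorization,
-- computing the divisor sum through the multiplicative product of sigma(p^k) — an
-- alternative algorithm of similar cost.


-- ===== PORT A =====
-- int(math.sqrt(num)) is ported as Nat.sqrt num.toNum-truncation: exact for 0 ≤ num ≤ 2^31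
-- (math.sqrt is correctly rounded and num < 2^52, so int() truncation agrees with isqrt).
-- Python's float test 'num1 == num/num1' is ported as num1 * num1 == num: exact on this domain,
-- since num1 divides num, both quotient candidates are integers < 2^53 and float division of
-- such ints is exact, so the float equality holds iff num1 * num1 == num.
def get_abundance (num : Int) : Int :=
  if num < 12 then 0
  else
    let result : Int := (PySem.List.pyRange 2 ((Nat.sqrt num.toNat : Int) + 1) 1).foldl
      (fun result num1 =>
        if PySem.Int.mod num num1 == 0 then
          if num1 * num1 == num then result + num1
          else result + (num1 + PySem.Int.floordiv num num1)
        else result) 0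
    if result + 1 ≤ num then 0 else result + 1 - num

-- ===== PORT B =====
-- helper for B's inner while loop: divides out the factor p, accumulating power_sum;
-- the '2 ≤ p ∧ 0 < n' conjuncts are termination guards only (always true at call sites)
def pvDivOut (p n ps : Nat) : Nat × Nat :=
  if h : 2 ≤ p ∧ 0 < n ∧ n % p = 0 then
    pvDivOut p (n / p) (ps * p + 1)
  else (n, ps)
termination_by n
decreasing_by exact Nat.div_lt_self h.2.1 (by omega)

-- needed by pvOuter's termination proof
lemma pvDivOut_fst_le (p n ps : Nat) : (pvDivOut p n ps).1 ≤ n := by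
  fun_induction pvDivOut with
  | case1 n ps h ih =>
    have hlt : n / p < n := Nat.div_lt_self h.2.1 (by omega)
    omega
  | case2 => simp

-- B's outer while loop: p scans candidates while p*p ≤ n; returns (sigma, remaining n);
-- the '1 ≤ p' conjunct is a termination guard only (always true at call sites)
def pvOuter (p n sigma : Nat) : Nat × Nat :=
  if h : 1 ≤ p ∧ p * p ≤ n then
    if n % p = 0 then
      let r := pvDivOut p n 1
      pvOuter (p + 1) r.1 (sigma * r.2)
    else pvOuter (p + 1) n sigma
  else (sigma, n)
termination_by n + 1 - p
decreasing_by
  · have h1 : (pvDivOut p n 1).1 ≤ n := pvDivOut_fst_le p n 1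
    have h2 : p ≤ p * p := Nat.le_mul_of_pos_left p (by omega)
    omega
  · have h2 : p ≤ p * p := Nat.le_mul_of_pos_left p (by omega)
    omega

-- loop variables n, p, sigma stay nonnegative, so they are carried as Nat
def get_abundance_alt (num : Int) : Int :=
  if num < 12 then 0
  else
    let r := pvOuter 2 num.toNat 1
    let sigma : Nat := if 1 < r.2 then r.1 * (r.2 + 1) else r.1
    let s : Int := (sigma : Int) - num
    if s > num then s - num else 0

-- ===== PRECONDITION & SPEC =====
def Spec_get_abundance (num : Int) (out : Int) : Prop := out = get_abundance_alt num
instance (num : Int) (out : Int) : Decidable (Spec_get_abundance num out) := by unfold Spec_get_abundance; infer_instance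

-- ===== CLAIM (what is proved, stated in full; the proofs are below) =====
def Claim_equal_get_abundance : Prop := ∀ (num : Int), Dom_get_abundance num → Spec_get_abundance num (get_abundance num)

-- ===== LEMMAS AND PROOFS =====

-- term added by A's loop for candidate divisor i (plus pairing), over Nat
def aTerm (n i : Nat) : Nat := if i ∣ n then (if i * i = n then i else i + n / i) else 0
-- term added by B's loop for candidate divisor i, over Nat
def bTerm (n i : Nat) : Nat := if i ∣ n then i else 0

-- the divisor-pairing identity: scanning all of [1, n) equals 1 + the sqrt-paired scan of [2, sqrt n]
lemma pairing (n : Nat) (hn : 2 ≤ n) :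
    ∑ i ∈ Finset.Ico 1 n, bTerm n i = 1 + ∑ i ∈ Finset.Ico 2 (Nat.sqrt n + 1), aTerm n i := by
  classical
  set s := Nat.sqrt n with hsdef
  have hsn : s < n := Nat.sqrt_lt_self (by omega)
  have hs1 : 1 ≤ s := Nat.sqrt_pos.mpr (by omega)
  have hss : s * s ≤ n := by simpa [pow_two] using Nat.sqrt_le' n
  have hlt : n < (s + 1) * (s + 1) := by simpa [pow_two, Nat.succ_eq_add_one] using Nat.lt_succ_sqrt' n
  rw [← Finset.sum_Ico_consecutive (fun i => bTerm n i) (by omega : (1:ℕ) ≤ 2) (by omega : (2:ℕ) ≤ n),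
      ← Finset.sum_Ico_consecutive (fun i => bTerm n i) (by omega : (2:ℕ) ≤ s + 1) (by omega : s + 1 ≤ n)]
  have h1 : ∑ i ∈ Finset.Ico 1 2, bTerm n i = 1 := by
    simp [bTerm]
  rw [h1]
  have hsplit : ∀ i, aTerm n i = bTerm n i + (if i ∣ n ∧ ¬ i * i = n then n / i else 0) := by
    intro i
    by_cases hd : i ∣ n
    · by_cases hsq : i * i = n <;> simp [aTerm, bTerm, hd, hsq]
    · simp [aTerm, bTerm, hd]
  have key : ∑ i ∈ Finset.Ico (s+1) n, bTerm n i
      = ∑ i ∈ Finset.Ico 2 (s+1), (if i ∣ n ∧ ¬ i * i = n then n / i else 0) := by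
    simp only [bTerm]
    rw [← Finset.sum_filter, ← Finset.sum_filter]
    refine (Finset.sum_nbij' (fun d => n / d) (fun i => n / i) ?_ ?_ ?_ ?_ ?_).symm
    · -- forward: small divisor i (2 ≤ i ≤ s, i² ≠ n) maps to a big divisor n / i
      intro i hi
      simp only [Finset.mem_filter, Finset.mem_Ico] at hi ⊢
      obtain ⟨⟨h2i, his⟩, hdvd, hnsq⟩ := hi
      have hi0 : 0 < i := by omega
      have hq : i * (n / i) = n := Nat.mul_div_cancel' hdvd
      have hq1 : 1 ≤ n / i := Nat.one_le_div_iff hi0 |>.mpr (Nat.le_of_dvd (by omega) hdvd)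
      refine ⟨⟨?_, Nat.div_lt_self (by omega) (by omega)⟩, Nat.div_dvd_of_dvd hdvd⟩
      by_contra hcon
      have hle : n / i ≤ s := by omega
      have his' : i ≤ s := by omega
      have hprod : i * (n / i) ≤ s * s := Nat.mul_le_mul his' hle
      have hn' : n = s * s := by omega
      have hi_lt : ¬ i < s := by
        intro hlt2
        have t1 : i * (n / i) ≤ i * s := Nat.mul_le_mul_left i hle
        have t2 : i * s < s * s := by nlinarith
        omega
      have hieq : i = s := by omega
      subst hieq
      exact hnsq hn'.symm
    · -- backward: big divisor d (s < d < n) maps back to the small divisor n / d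
      intro d hd
      simp only [Finset.mem_filter, Finset.mem_Ico] at hd ⊢
      obtain ⟨⟨hsd, hdn⟩, hdvd⟩ := hd
      have hd0 : 0 < d := by omega
      have hq : d * (n / d) = n := Nat.mul_div_cancel' hdvd
      have hq1 : 1 ≤ n / d := Nat.one_le_div_iff hd0 |>.mpr (Nat.le_of_dvd (by omega) hdvd)
      have hub : n / d ≤ s := by
        have h1 : n / d ≤ n / (s+1) := Nat.div_le_div_left hsd (by omega)
        have h2 : n / (s+1) < s + 1 := Nat.div_lt_of_lt_mul (by omega)
        omega
      have h2d : 2 ≤ n / d := by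
        rcases Nat.lt_or_ge (n / d) 2 with h | h
        · have hone : n / d = 1 := by omega
          rw [hone, Nat.mul_one] at hq
          omega
        · exact h
      refine ⟨⟨h2d, by omega⟩, Nat.div_dvd_of_dvd hdvd, ?_⟩
      intro hsq
      have hnds : n / d = s := by
        have : ¬ n / d < s := by intro h; nlinarith
        omega
      have hdd := Nat.div_div_self hdvd (show n ≠ 0 by omega)
      rw [hnds] at hdd
      have hneq : n = s * s := by nlinarith
      have hns : n / s = s := by rw [hneq]; exact Nat.mul_div_cancel_left s (by omega)
      omega
    · intro i hi
      simp only [Finset.mem_filter, Finset.mem_Ico] at hi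
      exact Nat.div_div_self hi.2.1 (by omega)
    · intro d hd
      simp only [Finset.mem_filter, Finset.mem_Ico] at hd
      exact Nat.div_div_self hd.2 (by omega)
    · intro i hi; rfl
  rw [key]
  have hc := Finset.sum_congr rfl (fun i (_ : i ∈ Finset.Ico 2 (s+1)) => hsplit i)
  rw [hc, Finset.sum_add_distrib]

def sigma1 (n : Nat) : Nat := ∑ d ∈ n.divisors, d

lemma divOut_spec (p : Nat) (hp : 2 ≤ p) : ∀ n ps, 0 < n →
    ∃ k, n = p ^ k * (pvDivOut p n ps).1 ∧ ¬ p ∣ (pvDivOut p n ps).1 ∧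
      (pvDivOut p n ps).2 = ps * p ^ k + ∑ i ∈ Finset.range k, p ^ i := by
  intro n
  induction n using Nat.strong_induction_on with
  | _ n ih =>
    intro ps hn
    by_cases h : 2 ≤ p ∧ 0 < n ∧ n % p = 0
    · rw [pvDivOut, dif_pos h]
      have hdvd : p ∣ n := Nat.dvd_of_mod_eq_zero h.2.2
      have hlt : n / p < n := Nat.div_lt_self hn (by omega)
      have hpos : 0 < n / p := Nat.div_pos (Nat.le_of_dvd hn hdvd) (by omega)
      obtain ⟨k, hk1, hk2, hk3⟩ := ih (n / p) hlt (ps * p + 1) hpos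
      refine ⟨k + 1, ?_, hk2, ?_⟩
      · have : p * (n / p) = n := Nat.mul_div_cancel' hdvd
        rw [pow_succ]
        nlinarith [hk1]
      · rw [hk3, Finset.sum_range_succ]
        ring
    · rw [pvDivOut, dif_neg h]
      refine ⟨0, by simp, ?_, by simp⟩
      intro hd
      exact h ⟨hp, hn, Nat.dvd_iff_mod_eq_zero.mp hd⟩

lemma sigma1_prime {q : Nat} (hq : q.Prime) : sigma1 q = q + 1 := by
  rw [sigma1, hq.divisors, Finset.sum_pair hq.one_lt.ne]
  omega


lemma sigma1_mul_coprime {a b : Nat} (h : Nat.Coprime a b) : sigma1 (a * b) = sigma1 a * sigma1 b := by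
  have hm := (ArithmeticFunction.isMultiplicative_sigma (k := 1)).map_mul_of_coprime h
  simpa [ArithmeticFunction.sigma_one_apply, sigma1] using hm

lemma sigma1_prime_pow {p : Nat} (k : Nat) (hp : p.Prime) :
    sigma1 (p ^ k) = ∑ i ∈ Finset.range (k + 1), p ^ i := by
  rw [sigma1]; exact Nat.sum_divisors_prime_pow hp

lemma prime_of_no_small_factor {n p : Nat} (h2 : 2 ≤ n) (hlt : ¬ p * p ≤ n)
    (hfac : ∀ q, q.Prime → q ∣ n → p ≤ q) : n.Prime := by
  obtain ⟨q, hq, hqd⟩ := Nat.exists_prime_and_dvd (show n ≠ 1 by omega)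
  have hpq : p ≤ q := hfac q hq hqd
  obtain ⟨m, hm⟩ := hqd
  have hm0 : 0 < m := by
    rcases Nat.eq_zero_or_pos m with h | h
    · subst h; omega
    · exact h
  have hmp : m < p := by
    by_contra hge
    have : p * p ≤ q * m := Nat.mul_le_mul hpq (by omega)
    omega
  have hm1 : m = 1 := by
    by_contra hne
    obtain ⟨r, hr, hrd⟩ := Nat.exists_prime_and_dvd hne
    have hrn : r ∣ n := hm ▸ hrd.mul_left q
    have := hfac r hr hrn
    have : r ≤ m := Nat.le_of_dvd hm0 hrd
    omega
  rw [hm, hm1, Nat.mul_one]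
  exact hq

lemma outer_exit (p n sigma : Nat) (_hp : 2 ≤ p) (hn : 0 < n) (hlt : ¬ p * p ≤ n)
    (hfac : ∀ q, q.Prime → q ∣ n → p ≤ q) :
    (if 1 < n then sigma * (n + 1) else sigma) = sigma * sigma1 n := by
  by_cases h1 : 1 < n
  · rw [if_pos h1, sigma1_prime (prime_of_no_small_factor (by omega) hlt hfac)]
  · have : n = 1 := by omega
    subst this
    simp [sigma1]

lemma outer_correct : ∀ (m p n sigma : Nat), n + 1 - p ≤ m → 2 ≤ p → 0 < n →
    (∀ q, q.Prime → q ∣ n → p ≤ q) →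
    (if 1 < (pvOuter p n sigma).2 then (pvOuter p n sigma).1 * ((pvOuter p n sigma).2 + 1)
     else (pvOuter p n sigma).1) = sigma * sigma1 n := by
  intro m
  induction m with
  | zero =>
    intro p n sigma hm hp hn hfac
    have hcond : ¬ (1 ≤ p ∧ p * p ≤ n) := by
      rintro ⟨h1, h2⟩
      have : p ≤ p * p := Nat.le_mul_of_pos_left p (by omega)
      omega
    rw [pvOuter, dif_neg hcond]
    exact outer_exit p n sigma hp hn (fun hh => hcond ⟨by omega, hh⟩) hfac
  | succ m ih =>
    intro p n sigma hm hp hn hfac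
    by_cases hcond : 1 ≤ p ∧ p * p ≤ n
    · have hpn : p ≤ n := le_trans (Nat.le_mul_of_pos_left p (by omega)) hcond.2
      rw [pvOuter, dif_pos hcond]
      by_cases hdv : n % p = 0
      · rw [if_pos hdv]
        have hpprime : p.Prime := by
          obtain ⟨q, hq, hqd⟩ := Nat.exists_prime_and_dvd (show p ≠ 1 by omega)
          have hqn : q ∣ n := hqd.trans (Nat.dvd_of_mod_eq_zero hdv)
          have h1 := hfac q hq hqn
          have h2 : q ≤ p := Nat.le_of_dvd (by omega) hqd
          have : q = p := le_antisymm h2 h1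
          rwa [← this]
        obtain ⟨k, hk1, hk2, hk3⟩ := divOut_spec p hp n 1 hn
        have hfst_le : (pvDivOut p n 1).1 ≤ n := pvDivOut_fst_le p n 1
        have hn'pos : 0 < (pvDivOut p n 1).1 := by
          rcases Nat.eq_zero_or_pos (pvDivOut p n 1).1 with h | h
          · rw [h, Nat.mul_zero] at hk1; omega
          · exact h
        have hfac' : ∀ q, q.Prime → q ∣ (pvDivOut p n 1).1 → p + 1 ≤ q := by
          intro q hq hqd
          have hqn : q ∣ n := hk1 ▸ hqd.mul_left (p ^ k)
          have h1 := hfac q hq hqn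
          rcases Nat.lt_or_ge p q with h | h
          · omega
          · exfalso
            have : q = p := by omega
            subst this
            exact hk2 hqd
        have hrec := ih (p + 1) (pvDivOut p n 1).1 (sigma * (pvDivOut p n 1).2)
          (by omega) (by omega) hn'pos hfac'
        have hcop : (p ^ k).Coprime (pvDivOut p n 1).1 :=
          (hpprime.coprime_iff_not_dvd.mpr hk2).pow_left k
        have hps : (pvDivOut p n 1).2 = ∑ i ∈ Finset.range (k + 1), p ^ i := by
          rw [hk3, Finset.sum_range_succ, one_mul]
          omega
        calc (if 1 < (pvOuter (p+1) (pvDivOut p n 1).1 (sigma * (pvDivOut p n 1).2)).2 then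
                (pvOuter (p+1) (pvDivOut p n 1).1 (sigma * (pvDivOut p n 1).2)).1 *
                  ((pvOuter (p+1) (pvDivOut p n 1).1 (sigma * (pvDivOut p n 1).2)).2 + 1)
              else (pvOuter (p+1) (pvDivOut p n 1).1 (sigma * (pvDivOut p n 1).2)).1)
            = sigma * (pvDivOut p n 1).2 * sigma1 (pvDivOut p n 1).1 := hrec
          _ = sigma * sigma1 n := by
              conv_rhs => rw [hk1]
              rw [sigma1_mul_coprime hcop, hps, sigma1_prime_pow k hpprime]
              ring
      · rw [if_neg hdv]
        have hfac' : ∀ q, q.Prime → q ∣ n → p + 1 ≤ q := by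
          intro q hq hqd
          have h1 := hfac q hq hqd
          rcases Nat.lt_or_ge p q with h | h
          · omega
          · exfalso
            have : q = p := by omega
            subst this
            exact hdv (Nat.dvd_iff_mod_eq_zero.mp hqd)
        exact ih (p + 1) n sigma (by omega) (by omega) hn hfac'
    · rw [pvOuter, dif_neg hcond]
      exact outer_exit p n sigma hp hn (fun hh => hcond ⟨by omega, hh⟩) hfac

-- sigma1 is n plus the sum of proper divisors scanned by bTerm
lemma sigma1_eq (n : Nat) :
    sigma1 n = (∑ i ∈ Finset.Ico 1 n, bTerm n i) + n := by
  rw [sigma1, Nat.sum_divisors_eq_sum_properDivisors_add_self]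
  congr 1
  rw [Nat.properDivisors, Finset.sum_filter]
  simp [bTerm]

-- A's loop computes the cast of the Nat sum of aTerm over [2, sqrt n]
lemma foldA_eq (n : Nat) (hn : 12 ≤ n) :
    (PySem.List.pyRange 2 ((Nat.sqrt n : Int) + 1) 1).foldl
      (fun result num1 => if PySem.Int.mod (n : Int) num1 == 0 then
          (if num1 * num1 == (n : Int) then result + num1
           else result + (num1 + PySem.Int.floordiv (n : Int) num1))
        else result) 0
    = ((∑ i ∈ Finset.Ico 2 (Nat.sqrt n + 1), aTerm n i : Nat) : Int) := by
  have hbody : (fun (result num1 : Int) => if PySem.Int.mod (n : Int) num1 == 0 then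
          (if num1 * num1 == (n : Int) then result + num1
           else result + (num1 + PySem.Int.floordiv (n : Int) num1))
        else result)
      = fun (result : Int) num1 => result + (if PySem.Int.mod (n : Int) num1 == 0 then
          (if num1 * num1 == (n : Int) then num1 else num1 + PySem.Int.floordiv (n : Int) num1)
        else 0) := by
    funext acc i
    by_cases h1 : (PySem.Int.mod (n : Int) i == 0) = true
    · by_cases h2 : (i * i == (n : Int)) = true <;> simp [h1, h2]
    · simp [h1]
  rw [hbody, PySem.List.foldl_add, zero_add, PySem.List.pyRange_one, List.map_map]
  have hm : (((Nat.sqrt n : Int) + 1) - 2).toNat = Nat.sqrt n - 1 := by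
    have : 1 ≤ Nat.sqrt n := Nat.sqrt_pos.mpr (by omega)
    omega
  rw [hm]
  have hsum : ((List.range (Nat.sqrt n - 1)).map
      ((fun i => if PySem.Int.mod (n : Int) i == 0 then
          (if i * i == (n : Int) then i else i + PySem.Int.floordiv (n : Int) i)
        else 0) ∘ fun (k : Nat) => (2 : Int) + (k : Int))).sum
      = ∑ k ∈ Finset.range (Nat.sqrt n - 1),
          (if PySem.Int.mod (n : Int) (2 + (k : Int)) == 0 then
            (if (2 + (k : Int)) * (2 + (k : Int)) == (n : Int) then 2 + (k : Int)
             else 2 + (k : Int) + PySem.Int.floordiv (n : Int) (2 + (k : Int)))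
           else 0) := rfl
  rw [hsum, Finset.sum_Ico_eq_sum_range, Nat.cast_sum]
  have hrange : Nat.sqrt n + 1 - 2 = Nat.sqrt n - 1 := by
    have : 1 ≤ Nat.sqrt n := Nat.sqrt_pos.mpr (by omega)
    omega
  rw [hrange]
  refine Finset.sum_congr rfl ?_
  intro k hk
  have hcast : ((2 + k : Nat) : Int) = 2 + (k : Int) := by push_cast; ring
  rw [← hcast, PySem.Int.mod_natCast, PySem.Int.floordiv_natCast,
      show ((2 + k : Nat) : Int) * ((2 + k : Nat) : Int) = (((2+k)*(2+k) : Nat) : Int) by push_cast; ring]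
  by_cases hd : (2+k) ∣ n
  · have hz : n % (2+k) = 0 := Nat.dvd_iff_mod_eq_zero.mp hd
    by_cases hsq : (2+k)*(2+k) = n
    · simp [hz, aTerm, hd, hsq]
    · have hbne : ¬ (((((2+k)*(2+k) : Nat)) : Int) == ((n : Nat) : Int)) = true := by
        simp only [beq_iff_eq, Nat.cast_inj]
        exact hsq
      rw [hz]
      rw [if_pos (by simp), if_neg hbne]
      simp only [aTerm, hd, hsq, if_false, if_pos]
      push_cast
      ring
  · simp only [aTerm, hd, if_false, Nat.cast_zero]
    have hz : ¬ ((((n % (2+k) : Nat) : Int)) == 0) = true := by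
      simp only [beq_iff_eq, Int.natCast_eq_zero]
      exact fun h => hd (Nat.dvd_of_mod_eq_zero h)
    simp
    intro hdvd
    exact absurd (by exact_mod_cast hdvd : (2+k) ∣ n) hd

-- ===== VERDICT (by name: the statement is the Claim_ definition above) =====
theorem get_abundance_spec : Claim_equal_get_abundance := by
  intro num _hdom
  unfold Spec_get_abundance get_abundance get_abundance_alt
  by_cases h : num < 12
  · simp [h]
  · simp only [h, if_false]
    have hn : num = ((num.toNat : Nat) : Int) := by omega
    have hn12 : 12 ≤ num.toNat := by omega
    rw [hn]
    rw [Int.toNat_natCast]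
    rw [foldA_eq num.toNat hn12]
    have houter := outer_correct (num.toNat + 1 - 2) 2 num.toNat 1 (le_refl _) (by omega)
      (by omega) (fun q hq _ => hq.two_le)
    rw [one_mul] at houter
    rw [houter]
    have hσ := sigma1_eq num.toNat
    have hp := pairing num.toNat (by omega)
    split_ifs <;> omega
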